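-- pv_equiv track=rewrite | github.com/IceCubeMaker/NiceOS | software/taskcli/code/src/tui_app.py | _apply_order
-- ===== SOURCE A (Python) =====
-- def _apply_order(items, saved_order):
--     """Reorder free items according to saved_order, while keeping
--     child items immediately after their parent."""
--     if not saved_order:
--         return items
--
--     by_key = {it["key"]: it for it in items}
--     # Separate anchored children from free items
--     children_of = {}   # parent_key → [child items in original order]
--     free = []
--     seen = set()
--     for it in items:
--         if it["parent_key"]:
--             children_of.setdefault(it["parent_key"], []).append(it)
--         else:
--             free.append(it)
--
--     # Reorder free items by saved_order, appending any new ones at end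
--     keyed_free = {it["key"]: it for it in free}
--     reordered_free = []
--     for k in saved_order:
--         if k in keyed_free and k not in seen:
--             reordered_free.append(keyed_free[k])
--             seen.add(k)
--     for it in free:
--         if it["key"] not in seen:
--             reordered_free.append(it)
--
--     # Now interleave: after each parent, insert its children
--     result = []
--     for it in reordered_free:
--         result.append(it)
--         for child in children_of.get(it["key"], []):
--             result.append(child)
--
--     return result
-- ===== SOURCE B (Python) =====
-- def _apply_order(items, saved_order):
--     """Reorder free items according to saved_order, while keeping
--     child items immediately after their parent."""
--     if not saved_order:
--         return items
--
--     # Separate anchored children from free items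
--     children_of = {}   # parent_key -> [child items in original order]
--     free = []
--     for it in items:
--         if it["parent_key"]:
--             children_of.setdefault(it["parent_key"], []).append(it)
--         else:
--             free.append(it)
--
--     # First-occurrence index of each key in saved_order; unknown keys sort last.
--     pos = {}
--     for i, k in enumerate(saved_order):
--         if k not in pos:
--             pos[k] = i
--     reordered_free = sorted(free, key=lambda it: pos.get(it["key"], len(saved_order)))
--
--     # Interleave: after each parent, insert its children
--     result = []
--     for it in reordered_free:
--         result.append(it)
--         result.extend(children_of.get(it["key"], []))
--     return result
-- ===== Notes on version B (the rewrite author's own statement) =====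
-- stated objective: simpler
-- what changed: The reorder phase's key-indexed dict plus seen-set scan over saved_order followed by a leftover pass is replaced by a first-occurrence index table over saved_order and ONE stable sort of the free items (unknown keys sort last); the dead by_key dict is dropped.
-- intended difference: On inputs where two free items share a 'key' that occurs in saved_order, A's key-indexed dict keeps only the last such item and its seen-set then silently drops the others from the output, while B's stable sort keeps every item; keeping all items is the intended behaviour of a reorder. — e.g. on _apply_order([[("key", some "a"), ("parent_key", none)], [("key", some "a"), ("parent_key", none)]], ["a"]): A returns [[("key", some "a"), ("parent_key", none)]], B returns [[("key", some "a"), ("parent_key", none)], [("key", some "a"), ("parent_key", none)]]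
import Mathlib
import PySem

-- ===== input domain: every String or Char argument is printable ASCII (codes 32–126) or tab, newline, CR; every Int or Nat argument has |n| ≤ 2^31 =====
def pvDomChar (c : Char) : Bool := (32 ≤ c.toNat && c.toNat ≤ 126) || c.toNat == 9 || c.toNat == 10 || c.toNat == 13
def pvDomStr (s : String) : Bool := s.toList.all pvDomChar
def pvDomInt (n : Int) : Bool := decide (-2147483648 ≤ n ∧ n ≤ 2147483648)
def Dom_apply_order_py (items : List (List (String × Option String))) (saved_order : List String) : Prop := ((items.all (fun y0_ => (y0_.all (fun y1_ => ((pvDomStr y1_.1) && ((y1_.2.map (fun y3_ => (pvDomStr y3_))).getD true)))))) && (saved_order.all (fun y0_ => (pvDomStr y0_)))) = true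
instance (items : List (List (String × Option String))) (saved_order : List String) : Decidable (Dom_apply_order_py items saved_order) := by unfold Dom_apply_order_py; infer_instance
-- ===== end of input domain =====

-- B replaces A's seen-set reorder scans over saved_order by a first-occurrence index table
-- plus one stable sort of the free items (simpler); on duplicate free keys named in
-- saved_order A silently drops items and B keeps them (see D_ below).

-- it[k] for an item dict; total stand-in: Pre_ guarantees the key is present
-- (Python raises KeyError on a missing key, which Pre_ excludes).
def pvItemGet (it : List (String × Option String)) (k : String) : Option String :=
  (PySem.Dict.mk it).getD k none

-- Python truthiness of an item field (None and "" are falsy)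
def pvTruthy (v : Option String) : Bool :=
  match v with
  | none => false
  | some s => decide (s ≠ "")

-- the separation pass, literally shared by A and B's Python:
-- children_of (setdefault(...).append = Dict.modify with default []) and free
def pvSeparate (items : List (List (String × Option String))) :
    PySem.Dict (Option String) (List (List (String × Option String))) × List (List (String × Option String)) :=
  items.foldl (fun st it =>
    if pvTruthy (pvItemGet it "parent_key") then
      (st.1.modify (pvItemGet it "parent_key") [] (fun l => l ++ [it]), st.2)
    else (st.1, st.2 ++ [it])) (PySem.Dict.empty, [])

-- the interleave pass, literally shared by A and B's Python
def pvInterleave (children_of : PySem.Dict (Option String) (List (List (String × Option String))))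
    (ordered : List (List (String × Option String))) : List (List (String × Option String)) :=
  ordered.foldl (fun res it =>
    (children_of.getD (pvItemGet it "key") []).foldl (fun r c => r ++ [c]) (res ++ [it])) []

-- ===== PORT A =====
def apply_order_py (items : List (List (String × Option String))) (saved_order : List String) : List (List (String × Option String)) :=
  if saved_order.isEmpty then items else
  let _by_key : PySem.Dict (Option String) (List (String × Option String)) :=
    items.foldl (fun d it => d.insert (pvItemGet it "key") it) PySem.Dict.empty
  let sep := pvSeparate items
  let keyed_free : PySem.Dict (Option String) (List (String × Option String)) :=
    sep.2.foldl (fun d it => d.insert (pvItemGet it "key") it) PySem.Dict.empty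
  -- 'if k in keyed_free and k not in seen': keyed_free[k] is total (getD) under the guard
  let st := saved_order.foldl (fun st k =>
      if PySem.Dict.contains keyed_free (some k) && !PySem.Set.contains st.2 (some k) then
        (st.1 ++ [PySem.Dict.getD keyed_free (some k) []], PySem.Set.add st.2 (some k))
      else st)
    (([] : List (List (String × Option String))), (PySem.Set.empty : PySem.Set (Option String)))
  let reordered_free := sep.2.foldl (fun rf it =>
      if PySem.Set.contains st.2 (pvItemGet it "key") then rf else rf ++ [it]) st.1
  pvInterleave sep.1 reordered_free

-- ===== PORT B =====
def apply_order_py_alt (items : List (List (String × Option String))) (saved_order : List String) : List (List (String × Option String)) :=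
  if saved_order.isEmpty then items else
  let sep := pvSeparate items
  -- pos's string keys are wrapped in 'some' so that pos.get(it["key"], len) is one total
  -- lookup (a None key never equals a wrapped string, exactly as in Python)
  let pos : PySem.Dict (Option String) Int :=
    (PySem.List.enumerate saved_order).foldl
      (fun d ik => if d.contains (some ik.2) then d else d.insert (some ik.2) ik.1) PySem.Dict.empty
  let reordered_free := PySem.List.sorted sep.2 (fun it =>
      pos.getD (pvItemGet it "key") (saved_order.length : Int))
  pvInterleave sep.1 reordered_free

-- ===== PRECONDITION & SPEC =====
-- Pre_ excludes exactly the inputs on which Python A raises KeyError: when saved_order is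
-- non-empty every item must carry both a "key" and a "parent_key" entry.
def Pre_apply_order_py (items : List (List (String × Option String))) (saved_order : List String) : Prop :=
  saved_order ≠ [] →
    ∀ it ∈ items, (PySem.Dict.mk it).contains "key" = true ∧ (PySem.Dict.mk it).contains "parent_key" = true
instance (items : List (List (String × Option String))) (saved_order : List String) : Decidable (Pre_apply_order_py items saved_order) := by unfold Pre_apply_order_py; infer_instance

def pvWitness_apply_order_py : (List (List (String × Option String))) × List String :=
  ([[("key", some "a"), ("parent_key", none)]], ["a"])

-- On inputs where two free items share a 'key' that occurs in saved_order, A's key-indexed dict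
-- keeps only the last such item and its seen-set then silently drops the others from the output,
-- while B's stable sort keeps every item; keeping all items is the intended behaviour of a reorder.
def D_apply_order_py (items : List (List (String × Option String))) (saved_order : List String) : Prop :=
  saved_order ≠ [] ∧ ∃ k ∈ saved_order,
    2 ≤ (items.filter (fun it => !pvTruthy (pvItemGet it "parent_key"))).countP
          (fun it => pvItemGet it "key" == some k)
instance (items : List (List (String × Option String))) (saved_order : List String) : Decidable (D_apply_order_py items saved_order) := by unfold D_apply_order_py; infer_instance

def Spec_apply_order_py (items : List (List (String × Option String))) (saved_order : List String) (out : List (List (String × Option String))) : Prop :=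
  ¬ D_apply_order_py items saved_order → out = apply_order_py_alt items saved_order
instance (items : List (List (String × Option String))) (saved_order : List String) (out : List (List (String × Option String))) : Decidable (Spec_apply_order_py items saved_order out) := by unfold Spec_apply_order_py; infer_instance

def pvDiffWitness_apply_order_py : (List (List (String × Option String))) × List String :=
  ([[("key", some "a"), ("parent_key", none)], [("key", some "a"), ("parent_key", none)]], ["a"])
def pvDiffWitnessOut_apply_order_py : (List (List (String × Option String))) × (List (List (String × Option String))) :=
  ([[("key", some "a"), ("parent_key", none)]],
   [[("key", some "a"), ("parent_key", none)], [("key", some "a"), ("parent_key", none)]])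

-- ===== CLAIM (what is proved, stated in full; the proofs are below) =====
def Claim_unchanged_apply_order_py : Prop := ∀ (items : List (List (String × Option String))) (saved_order : List String), Dom_apply_order_py items saved_order → Pre_apply_order_py items saved_order → Spec_apply_order_py items saved_order (apply_order_py items saved_order)
def Claim_exact_apply_order_py : Prop := ∀ (items : List (List (String × Option String))) (saved_order : List String), Dom_apply_order_py items saved_order → Pre_apply_order_py items saved_order → D_apply_order_py items saved_order → apply_order_py items saved_order ≠ apply_order_py_alt items saved_order
def Claim_changed_apply_order_py : Prop := Dom_apply_order_py (pvDiffWitness_apply_order_py.1) (pvDiffWitness_apply_order_py.2) ∧ Pre_apply_order_py (pvDiffWitness_apply_order_py.1) (pvDiffWitness_apply_order_py.2) ∧ D_apply_order_py (pvDiffWitness_apply_order_py.1) (pvDiffWitness_apply_order_py.2) ∧ apply_order_py (pvDiffWitness_apply_order_py.1) (pvDiffWitness_apply_order_py.2) = pvDiffWitnessOut_apply_order_py.1 ∧ apply_order_py_alt (pvDiffWitness_apply_order_py.1) (pvDiffWitness_apply_order_py.2) = pvDiffWitnessOut_apply_order_py.2 ∧ pvDiffWitnessOut_apply_order_py.1 ≠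 pvDiffWitnessOut_apply_order_py.2

-- ===== LEMMAS AND PROOFS =====

-- abbreviations for the proofs
abbrev PvItem := List (String × Option String)

def pvKey (it : PvItem) : Option String := pvItemGet it "key"

-- keyed_free[k] = last free item whose "key" is k
def pvLookup (free : List PvItem) (k : String) : Option PvItem :=
  free.reverse.find? (fun it => pvKey it == some k)

-- the sort key B uses, as a function of saved_order: first index of the key, length if absent
def pvIdx (saved : List String) (v : Option String) : Int :=
  match v with
  | some s => match saved.findIdx? (· == s) with
              | some i => (i : Int)
              | none => (saved.length : Int)
  | none => (saved.length : Int)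

-- A's first reorder loop, as structural recursion on saved_order
def picksA (lk : String → Option PvItem) : List String → PySem.Set (Option String) → List PvItem
  | [], _ => []
  | k :: ks, s =>
    match lk k with
    | some it => if PySem.Set.contains s (some k) then picksA lk ks s
                 else it :: picksA lk ks (PySem.Set.add s (some k))
    | none => picksA lk ks s

def seenA (lk : String → Option PvItem) : List String → PySem.Set (Option String) → PySem.Set (Option String)
  | [], s => s
  | k :: ks, s =>
    match lk k with
    | some _ => if PySem.Set.contains s (some k) then seenA lk ks s
                else seenA lk ks (PySem.Set.add s (some k))
    | none => seenA lk ks s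

lemma contains_iff_mem {α : Type} [BEq α] [LawfulBEq α] (s : PySem.Set α) (x : α) :
    PySem.Set.contains s x = true ↔ x ∈ s := by
  simp [PySem.Set.contains]

lemma foldlA_eq (kf : PySem.Dict (Option String) PvItem) (ks : List String) : ∀ (rf : List PvItem) (s : PySem.Set (Option String)),
    ks.foldl (fun st k =>
      if PySem.Dict.contains kf (some k) && !PySem.Set.contains st.2 (some k) then
        (st.1 ++ [PySem.Dict.getD kf (some k) []], PySem.Set.add st.2 (some k))
      else st) (rf, s)
    = (rf ++ picksA (fun k => PySem.Dict.get? kf (some k)) ks s,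
       seenA (fun k => PySem.Dict.get? kf (some k)) ks s) := by
  induction ks with
  | nil => intro rf s; simp [picksA, seenA]
  | cons k ks ih =>
    intro rf s
    simp only [List.foldl_cons, picksA, seenA]
    cases hg : PySem.Dict.get? kf (some k) with
    | none =>
      have hc : PySem.Dict.contains kf (some k) = false := by
        rw [PySem.Dict.contains_eq_isSome_get?, hg]; rfl
      simp only [hc, Bool.false_and, Bool.false_eq_true, if_false]
      exact ih rf s
    | some a =>
      have hc : PySem.Dict.contains kf (some k) = true := by
        rw [PySem.Dict.contains_eq_isSome_get?, hg]; rfl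
      have hgd : PySem.Dict.getD kf (some k) [] = a := by
        rw [PySem.Dict.getD_eq_get?_getD, hg]; rfl
      by_cases hs : PySem.Set.contains s (some k) = true
      · simp only [hc, hs, Bool.not_true, Bool.and_false, Bool.false_eq_true, if_false]
        exact ih rf s
      · have hs' : PySem.Set.contains s (some k) = false := by
          rw [← Bool.not_eq_true]; exact hs
        simp only [hc, hs', Bool.not_false, Bool.and_true, if_true, hgd,
          ih (rf ++ [a]) (PySem.Set.add s (some k))]
        simp

lemma get?_keyedFree (free : List PvItem) (v : Option String) :
    (free.foldl (fun d it => d.insert (pvKey it) it) PySem.Dict.empty).get? v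
      = free.reverse.find? (fun it => pvKey it == v) := by
  induction free using List.reverseRecOn with
  | nil => simp [PySem.Dict.get?_empty]
  | append_singleton xs x ih =>
    rw [List.foldl_append]
    simp only [List.foldl_cons, List.foldl_nil, List.reverse_append, List.reverse_cons,
      List.reverse_nil, List.nil_append, List.cons_append, List.find?_cons]
    rw [PySem.Dict.get?_insert]
    by_cases h : v = pvKey x
    · simp [h]
    · have hbe : (pvKey x == v) = false := by
        simp; exact fun he => h he.symm
      simp [h, hbe, ih]

lemma get?_posFold (saved : List String) : ∀ (s0 : Int) (d : PySem.Dict (Option String) Int) (v : Option String),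
    ((PySem.List.enumerate saved s0).foldl
      (fun d ik => if d.contains (some ik.2) then d else d.insert (some ik.2) ik.1) d).get? v
    = match d.get? v with
      | some w => some w
      | none => (saved.findIdx? (fun x => (some x : Option String) == v)).map (fun i : Nat => s0 + (i : Int)) := by
  induction saved with
  | nil =>
    intro s0 d v
    simp only [PySem.List.enumerate_nil, List.foldl_nil, List.findIdx?_nil, Option.map_none]
    cases d.get? v <;> simp
  | cons x xs ih =>
    intro s0 d v
    rw [PySem.List.enumerate_cons]
    simp only [List.foldl_cons, List.findIdx?_cons]
    by_cases hc : d.contains (some x) = true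
    · rw [if_pos hc, ih]
      by_cases hk : (some x : Option String) = v
      · subst hk
        have hne : d.get? (some x) ≠ none := by
          rw [Ne, PySem.Dict.get?_eq_none_iff_contains]; simp [hc]
        cases hg : d.get? (some x) with
        | none => exact absurd hg hne
        | some w => simp
      · have hbe : ((some x : Option String) == v) = false := by simp [hk]
        simp only [hbe]
        cases hg : d.get? v with
        | none =>
          simp only [hg]
          cases hf : xs.findIdx? (fun y => (some y : Option String) == v) with
          | none => simp
          | some i => simp; ring
        | some w => simp
    · rw [if_neg hc]
      rw [ih]
      by_cases hk : (some x : Option String) = v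
      · subst hk
        rw [PySem.Dict.get?_insert]
        have hg : d.get? (some x) = none := by
          rw [PySem.Dict.get?_eq_none_iff_contains]; simpa using hc
        simp [hg]
      · rw [PySem.Dict.get?_insert, if_neg (fun h => hk h.symm)]
        have hbe : ((some x : Option String) == v) = false := by simp [hk]
        simp only [hbe]
        cases hg : d.get? v with
        | none =>
          simp only [hg]
          cases hf : xs.findIdx? (fun y => (some y : Option String) == v) with
          | none => simp
          | some i => simp; ring
        | some w => simp

lemma keyB_eq (saved : List String) :
    (fun it : PvItem =>
      ((PySem.List.enumerate saved).foldl
        (fun d ik => if d.contains (some ik.2) then d else d.insert (some ik.2) ik.1)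
        PySem.Dict.empty).getD (pvItemGet it "key") (saved.length : Int))
    = fun it => pvIdx saved (pvKey it) := by
  funext it
  rw [PySem.Dict.getD_eq_get?_getD, get?_posFold saved 0 PySem.Dict.empty (pvItemGet it "key"),
    PySem.Dict.get?_empty]
  simp only [pvIdx, pvKey]
  cases hv : pvItemGet it "key" with
  | none =>
    have hnone : saved.findIdx? (fun x : String => false) = none := by
      rw [List.findIdx?_eq_none_iff]; intro x _; rfl
    simp [hnone]
  | some str =>
    have hfn : (fun x => (some x : Option String) == some str) = (fun x => x == str) := by
      funext x; simp
    rw [hfn]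
    cases hf : saved.findIdx? (· == str) with
    | none => simp [hf]
    | some i => simp [hf]

lemma pvIdx_le (saved : List String) (v : Option String) : pvIdx saved v ≤ (saved.length : Int) := by
  cases v with
  | none => simp [pvIdx]
  | some s =>
    simp only [pvIdx]
    cases h : saved.findIdx? (· == s) with
    | none => simp
    | some i =>
      have hi := List.findIdx?_eq_some_iff_findIdx_eq.mp h
      simp only [h]
      omega

lemma pvIdx_lt_iff (saved : List String) (v : Option String) :
    pvIdx saved v < (saved.length : Int) ↔ ∃ s, v = some s ∧ s ∈ saved := by
  cases v with
  | none => simp [pvIdx]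
  | some s =>
    simp only [pvIdx]
    cases h : saved.findIdx? (· == s) with
    | none =>
      simp only [h, lt_irrefl, false_iff]
      rintro ⟨s', hs, hmem⟩
      injection hs with hs; subst hs
      have hne : saved.findIdx? (· == s) ≠ none := by
        rw [Ne, List.findIdx?_eq_none_iff]
        push_neg
        exact ⟨s, hmem, by simp⟩
      exact hne h
    | some i =>
      have hi := List.findIdx?_eq_some_iff_findIdx_eq.mp h
      simp only [h]
      constructor
      · intro _
        have hne : saved.findIdx? (· == s) ≠ none := by simp [h]
        rw [Ne, List.findIdx?_eq_none_iff] at hne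
        push_neg at hne
        obtain ⟨x, hx, hpx⟩ := hne
        have hxs : x = s := by simpa using hpx
        exact ⟨s, rfl, hxs ▸ hx⟩
      · intro _; omega

lemma mem_seenA (lk : String → Option PvItem) (ks : List String) : ∀ (s : PySem.Set (Option String)) (v : Option String),
    v ∈ seenA lk ks s ↔ v ∈ s ∨ ∃ k ∈ ks, v = some k ∧ (lk k).isSome := by
  induction ks with
  | nil => intro s v; simp [seenA]
  | cons k ks ih =>
    intro s v
    simp only [seenA]
    cases hlk : lk k with
    | none =>
      rw [ih]
      constructor
      · rintro (h | h); · exact Or.inl h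
        · exact Or.inr (by obtain ⟨k', hk', h1, h2⟩ := h; exact ⟨k', by simp [hk'], h1, h2⟩)
      · rintro (h | ⟨k', hk', h1, h2⟩); · exact Or.inl h
        · rcases List.mem_cons.mp hk' with rfl | hk'
          · subst h1; rw [hlk] at h2; simp at h2
          · exact Or.inr ⟨k', hk', h1, h2⟩
    | some it =>
      simp only [hlk]
      by_cases hc : some k ∈ s
      · rw [if_pos ((contains_iff_mem s (some k)).mpr hc), ih]
        constructor
        · rintro (h | ⟨k', hk', h1, h2⟩); · exact Or.inl h
          · exact Or.inr ⟨k', by simp [hk'], h1, h2⟩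
        · rintro (h | ⟨k', hk', h1, h2⟩); · exact Or.inl h
          · rcases List.mem_cons.mp hk' with rfl | hk'
            · exact Or.inl (by subst h1; exact hc)
            · exact Or.inr ⟨k', hk', h1, h2⟩
      · rw [if_neg (fun hcc => hc ((contains_iff_mem s (some k)).mp hcc)), ih]
        simp only [PySem.Set.mem_add]
        constructor
        · rintro ((h | h) | ⟨k', hk', h1, h2⟩)
          · exact Or.inl h
          · exact Or.inr ⟨k, by simp, h, by simp [hlk]⟩
          · exact Or.inr ⟨k', by simp [hk'], h1, h2⟩
        · rintro (h | ⟨k', hk', h1, h2⟩); · exact Or.inl (Or.inl h)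
          · rcases List.mem_cons.mp hk' with rfl | hk'
            · exact Or.inl (Or.inr h1)
            · exact Or.inr ⟨k', hk', h1, h2⟩

lemma mem_picksA (lk : String → Option PvItem) (ks : List String) : ∀ (s : PySem.Set (Option String)) (it : PvItem),
    it ∈ picksA lk ks s ↔ ∃ k, k ∈ ks ∧ ¬ (some k ∈ s) ∧ lk k = some it := by
  induction ks with
  | nil => intro s it; simp [picksA]
  | cons k ks ih =>
    intro s it
    simp only [picksA]
    cases hlk : lk k with
    | none =>
      rw [ih]
      constructor
      · rintro ⟨k', hk', h1, h2⟩; exact ⟨k', by simp [hk'], h1, h2⟩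
      · rintro ⟨k', hk', h1, h2⟩
        rcases List.mem_cons.mp hk' with rfl | hk'
        · rw [hlk] at h2; simp at h2
        · exact ⟨k', hk', h1, h2⟩
    | some a =>
      simp only [hlk]
      by_cases hc : some k ∈ s
      · rw [if_pos ((contains_iff_mem s (some k)).mpr hc), ih]
        constructor
        · rintro ⟨k', hk', h1, h2⟩; exact ⟨k', by simp [hk'], h1, h2⟩
        · rintro ⟨k', hk', h1, h2⟩
          rcases List.mem_cons.mp hk' with rfl | hk'
          · exact absurd hc h1
          · exact ⟨k', hk', h1, h2⟩
      · rw [if_neg (fun hcc => hc ((contains_iff_mem s (some k)).mp hcc))]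
        simp only [List.mem_cons, ih, PySem.Set.mem_add]
        constructor
        · rintro (rfl | ⟨k', hk', h1, h2⟩)
          · exact ⟨k, by simp, hc, hlk⟩
          · exact ⟨k', by simp [hk'], fun hm => h1 (Or.inl hm), h2⟩
        · rintro ⟨k', hk', h1, h2⟩
          rcases hk' with rfl | hk'
          · rw [hlk] at h2; exact Or.inl (by injection h2 with h; exact h.symm)
          · by_cases he : some k' = some k
            · injection he with he; subst he
              rw [hlk] at h2; exact Or.inl (by injection h2 with h; exact h.symm)
            · refine Or.inr ⟨k', hk', fun hm => ?_, h2⟩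
              rcases hm with hm | hm
              · exact h1 hm
              · exact he hm

lemma picksA_append (lk : String → Option PvItem) (ks : List String) (k : String) : ∀ (s : PySem.Set (Option String)),
    picksA lk (ks ++ [k]) s = picksA lk ks s ++
      (match lk k with
       | some it => if PySem.Set.contains (seenA lk ks s) (some k) then [] else [it]
       | none => []) := by
  induction ks with
  | nil =>
    intro s
    simp only [List.nil_append, picksA, seenA]
    cases hlk : lk k with
    | none => simp [picksA]
    | some it =>
      simp only [hlk]
      by_cases hc : some k ∈ s <;> simp [hc, contains_iff_mem, picksA]
  | cons k' ks ih =>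
    intro s
    cases hlk : lk k' with
    | none => simp only [List.cons_append, picksA, seenA, hlk]; exact ih s
    | some a =>
      simp only [List.cons_append, picksA, seenA, hlk]
      by_cases hc : PySem.Set.contains s (some k') = true
      · rw [if_pos hc, if_pos hc, if_pos hc]; exact ih s
      · rw [if_neg hc, if_neg hc, if_neg hc, ih (PySem.Set.add s (some k'))]
        simp

lemma picksA_pairwise (lk : String → Option PvItem) (saved : List String)
    (hlk : ∀ k it, lk k = some it → pvKey it = some k) :
    ∀ ks, ks <+: saved →
      (picksA lk ks PySem.Set.empty).Pairwise (fun a b => pvIdx saved (pvKey a) < pvIdx saved (pvKey b)) := by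
  intro ks
  induction ks using List.reverseRecOn with
  | nil => intro _; simp [picksA]
  | append_singleton ks k ih =>
    intro hpre
    have hpre' : ks <+: saved := (List.prefix_append ks [k]).trans hpre
    rw [picksA_append]
    cases hlkk : lk k with
    | none => simpa using ih hpre'
    | some it =>
      dsimp only
      by_cases hc : PySem.Set.contains (seenA lk ks PySem.Set.empty) (some k) = true
      · rw [if_pos hc]; simpa using ih hpre'
      · rw [if_neg hc, List.pairwise_append]
        refine ⟨ih hpre', List.pairwise_singleton _ _, ?_⟩
        intro a ha b hb
        rw [List.mem_singleton] at hb; subst hb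
        -- k does not occur in ks
        have hknotin : k ∉ ks := by
          intro hkin
          exact hc ((contains_iff_mem _ _).mpr ((mem_seenA lk ks PySem.Set.empty (some k)).mpr
            (Or.inr ⟨k, hkin, rfl, by simp [hlkk]⟩)))
        -- the key of the appended item is k, and its first index in saved is ks.length
        obtain ⟨t, ht⟩ := hpre
        have hkey : pvKey b = some k := hlk k b hlkk
        have hidxb : pvIdx saved (pvKey b) = (ks.length : Int) := by
          rw [hkey]
          simp only [pvIdx, ← ht, List.append_assoc, List.findIdx?_append]
          have h1 : ks.findIdx? (· == k) = none := by
            rw [List.findIdx?_eq_none_iff]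
            intro x hx
            simp only [beq_eq_false_iff_ne, ne_eq]
            exact fun he => hknotin (he ▸ hx)
          rw [h1]
          simp
        -- a comes from some k' ∈ ks
        obtain ⟨k', hk'in, -, hlk'⟩ := (mem_picksA lk ks PySem.Set.empty a).mp ha
        have hkeya : pvKey a = some k' := hlk k' a hlk'
        have hidxa : pvIdx saved (pvKey a) < (ks.length : Int) := by
          rw [hkeya]
          have hne : ks.findIdx? (· == k') ≠ none := by
            rw [Ne, List.findIdx?_eq_none_iff]
            push_neg
            exact ⟨k', hk'in, by simp⟩
          cases hj : ks.findIdx? (· == k') with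
          | none => exact absurd hj hne
          | some j =>
            have hjlt := List.findIdx?_eq_some_iff_findIdx_eq.mp hj
            simp only [pvIdx, ← ht, List.append_assoc, List.findIdx?_append, hj, Option.some_or]
            omega
        omega

lemma insertBy_append_of_before {α : Type} (before : α → α → Bool) (x : α) (S T : List α)
    (h : ∀ y ∈ T, before x y = true) :
    PySem.List.insertBy before x (S ++ T) = PySem.List.insertBy before x S ++ T := by
  induction S with
  | nil =>
    cases T with
    | nil => simp
    | cons t ts => simp [PySem.List.insertBy, h t (by simp)]
  | cons s S ih =>
    simp only [List.cons_append, PySem.List.insertBy]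
    by_cases hb : before x s <;> simp [hb, ih]

lemma stable_split {α : Type} (key : α → Int) (c : Int) : ∀ (xs : List α), (∀ x ∈ xs, key x ≤ c) →
    PySem.List.sorted xs key = PySem.List.sorted (xs.filter (fun x => decide (key x < c))) key
      ++ xs.filter (fun x => decide (key x = c)) := by
  intro xs
  induction xs using List.reverseRecOn with
  | nil => intro _; simp
  | append_singleton xs x ih =>
    intro h
    have hxs : ∀ y ∈ xs, key y ≤ c := fun y hy => h y (by simp [hy])
    have hx : key x ≤ c := h x (by simp)
    rw [PySem.List.sorted_eq_foldl_insertBy, List.foldl_append, ← PySem.List.sorted_eq_foldl_insertBy]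
    simp only [List.foldl_cons, List.foldl_nil]
    rw [ih hxs, List.filter_append, List.filter_append]
    by_cases hlt : key x < c
    · have hfl : List.filter (fun y => decide (key y < c)) [x] = [x] := by simp [hlt]
      have hfe : List.filter (fun y => decide (key y = c)) [x] = [] := by
        simp; omega
      rw [hfl, hfe, List.append_nil]
      rw [insertBy_append_of_before _ x _ _ ?hT]
      case hT =>
        intro y hy
        have hyc : key y = c := by
          have := List.of_mem_filter hy; simpa using this
        simp [hyc, hlt]
      rw [PySem.List.sorted_eq_foldl_insertBy (xs.filter (fun y => decide (key y < c)) ++ [x]),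
        List.foldl_append, ← PySem.List.sorted_eq_foldl_insertBy]
      simp
    · have heq : key x = c := le_antisymm hx (by omega)
      have hfl : List.filter (fun y => decide (key y < c)) [x] = [] := by simp; omega
      have hfe : List.filter (fun y => decide (key y = c)) [x] = [x] := by simp [heq]
      rw [hfl, hfe, List.append_nil]
      rw [PySem.List.insertBy_of_forall_not_before _ _ _ ?hall]
      case hall =>
        intro y hy
        rcases List.mem_append.mp hy with hy | hy
        · have : y ∈ xs.filter (fun y => decide (key y < c)) :=
            (PySem.List.mem_sorted _ _ _ _).mp hy
          have hyx : key y ≤ c := hxs y (List.mem_of_mem_filter this)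
          simp; omega
        · have hyc : key y = c := by
            have := List.of_mem_filter hy; simpa using this
          simp [hyc, heq]
      rw [List.append_assoc]

lemma two_le_length {α : Type} {l : List α} {a b : α} (ha : a ∈ l) (hb : b ∈ l) (hne : a ≠ b) :
    2 ≤ l.length := by
  match l with
  | [] => simp at ha
  | [x] => simp at ha hb; exact absurd (ha.trans hb.symm) hne
  | x :: y :: t => simp only [List.length_cons]; omega

lemma two_le_countP {α : Type} {l : List α} {p : α → Bool} {a b : α}
    (ha : a ∈ l) (hb : b ∈ l) (pa : p a = true) (pb : p b = true) (hne : a ≠ b) :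
    2 ≤ l.countP p := by
  rw [List.countP_eq_length_filter]
  exact two_le_length (List.mem_filter.mpr ⟨ha, pa⟩) (List.mem_filter.mpr ⟨hb, pb⟩) hne

lemma pvSeparate_snd (items : List PvItem) :
    (pvSeparate items).2 = items.filter (fun it => !pvTruthy (pvItemGet it "parent_key")) := by
  have hgen : ∀ (its : List PvItem) (d : PySem.Dict (Option String) (List PvItem)) (l : List PvItem),
      (its.foldl (fun st it =>
        if pvTruthy (pvItemGet it "parent_key") then
          (st.1.modify (pvItemGet it "parent_key") [] (fun l => l ++ [it]), st.2)
        else (st.1, st.2 ++ [it])) (d, l)).2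
        = l ++ its.filter (fun it => !pvTruthy (pvItemGet it "parent_key")) := by
    intro its
    induction its with
    | nil => intro d l; simp
    | cons it its ih =>
      intro d l
      simp only [List.foldl_cons]
      by_cases hp : pvTruthy (pvItemGet it "parent_key")
      · simp [hp, ih]
      · simp [hp, ih]
  simpa using hgen items PySem.Dict.empty []

lemma pvLookup_eq_of_uniq (free : List PvItem) (k : String) (it : PvItem)
    (huniq : free.countP (fun it => pvKey it == some k) ≤ 1)
    (hmem : it ∈ free) (hk : pvKey it = some k) :
    pvLookup free k = some it := by
  have hex : ∃ x ∈ free.reverse, (pvKey x == some k) = true := ⟨it, by simp [hmem], by simp [hk]⟩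
  rw [pvLookup]
  cases hf : free.reverse.find? (fun it => pvKey it == some k) with
  | none =>
    rw [List.find?_eq_none] at hf
    obtain ⟨x, hx, hpx⟩ := hex
    exact absurd hpx (by simp [hf x hx])
  | some it' =>
    have h1 : (pvKey it' == some k) = true := by
      have := List.find?_some hf; simpa using this
    have h2 : it' ∈ free := by
      have := List.mem_of_find?_eq_some hf; simpa using this
    by_cases he : it' = it
    · rw [he]
    · exfalso
      have h2le : 2 ≤ free.countP (fun it => pvKey it == some k) :=
        two_le_countP h2 hmem h1 (by simp [hk]) he
      omega

lemma foldl_skip_if {α : Type} (p : α → Bool) (l : List α) (acc : List α) :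
    l.foldl (fun acc x => if p x then acc else acc ++ [x]) acc = acc ++ l.filter (fun x => !p x) := by
  have h : (fun (acc : List α) x => if p x then acc else acc ++ [x])
      = (fun acc x => if (!p x) = true then acc ++ [(fun y => y) x] else acc) := by
    funext acc x; cases hp : p x <;> simp [hp]
  rw [h, PySem.List.foldl_append_if]
  simp

lemma sortedB_eq (free : List PvItem) (saved : List String) :
    PySem.List.sorted free (fun it =>
      ((PySem.List.enumerate saved).foldl
        (fun d ik => if d.contains (some ik.2) then d else d.insert (some ik.2) ik.1)
        PySem.Dict.empty).getD (pvItemGet it "key") (saved.length : Int))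
    = PySem.List.sorted free (fun it => pvIdx saved (pvKey it)) := by
  exact congrArg (fun key => PySem.List.sorted free key) (keyB_eq saved)

theorem main_equiv (items : List (List (String × Option String))) (saved_order : List String)
    (hnd : ¬ D_apply_order_py items saved_order) :
    apply_order_py items saved_order = apply_order_py_alt items saved_order := by
  by_cases hemp : saved_order.isEmpty = true
  · unfold apply_order_py apply_order_py_alt
    rw [if_pos hemp, if_pos hemp]
  · have hsne : saved_order ≠ [] := by simpa [List.isEmpty_iff] using hemp
    unfold apply_order_py apply_order_py_alt
    rw [if_neg hemp, if_neg hemp]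
    simp only []
    set free := (pvSeparate items).2 with hfree
    set n : Int := (saved_order.length : Int) with hn
    have huniq : ∀ k ∈ saved_order, free.countP (fun it => pvKey it == some k) ≤ 1 := by
      intro k hk
      by_contra hgt
      push_neg at hgt
      refine hnd ⟨hsne, k, hk, ?_⟩
      rw [← pvSeparate_snd items]
      simpa [pvKey] using hgt
    refine congrArg (pvInterleave (pvSeparate items).1) ?_
    rw [foldlA_eq (free.foldl (fun d it => d.insert (pvItemGet it "key") it) PySem.Dict.empty)
        saved_order [] PySem.Set.empty]
    simp only [List.nil_append]
    set lk : String → Option PvItem := (fun k =>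
        PySem.Dict.get? (free.foldl (fun d it => d.insert (pvItemGet it "key") it) PySem.Dict.empty) (some k))
      with hlkdef
    have hlkEq : ∀ k, lk k = pvLookup free k := by
      intro k
      rw [hlkdef]
      show (free.foldl (fun d it => d.insert (pvKey it) it) PySem.Dict.empty).get? (some k) = _
      rw [get?_keyedFree free (some k)]
      rfl
    have hlk_key : ∀ k it, lk k = some it → pvKey it = some k := by
      intro k it h
      rw [hlkEq] at h
      have := List.find?_some h
      simpa using this
    have hlk_mem : ∀ k it, lk k = some it → it ∈ free := by
      intro k it h
      rw [hlkEq] at h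
      have := List.mem_of_find?_eq_some h
      simpa using this
    have hlk_of_mem : ∀ k it, it ∈ free → pvKey it = some k → k ∈ saved_order → lk k = some it := by
      intro k it hmem hkey hks
      rw [hlkEq]
      exact pvLookup_eq_of_uniq free k it (huniq k hks) hmem hkey
    rw [foldl_skip_if (fun it => PySem.Set.contains (seenA lk saved_order PySem.Set.empty) (pvItemGet it "key")) free
        (picksA lk saved_order PySem.Set.empty)]
    rw [sortedB_eq free saved_order]
    rw [stable_split (fun it => pvIdx saved_order (pvKey it)) n free (fun x _ => pvIdx_le saved_order (pvKey x))]
    have hseen : ∀ it : PvItem, it ∈ free →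
        (PySem.Set.contains (seenA lk saved_order PySem.Set.empty) (pvKey it) = true
          ↔ pvIdx saved_order (pvKey it) < n) := by
      intro it hmem
      rw [contains_iff_mem, mem_seenA]
      constructor
      · rintro (h | ⟨k, hk, hkey, -⟩)
        · simp [PySem.Set.empty] at h
        · exact (pvIdx_lt_iff saved_order (pvKey it)).mpr ⟨k, hkey, hk⟩
      · intro h
        obtain ⟨str, hkey, hsmem⟩ := (pvIdx_lt_iff saved_order (pvKey it)).mp h
        exact Or.inr ⟨str, hsmem, hkey, by rw [hlk_of_mem str it hmem hkey hsmem]; rfl⟩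
    refine congrArg₂ (· ++ ·) ?_ ?_
    · symm
      apply PySem.List.sorted_eq_of_perm_of_pairwise_lt
      · have hnodup_picks : (picksA lk saved_order PySem.Set.empty).Nodup := by
          have hpw := picksA_pairwise lk saved_order hlk_key saved_order (List.prefix_refl _)
          exact hpw.imp (fun {a b} hab heq => by rw [heq] at hab; exact lt_irrefl _ hab)
        have hnodup_filter : (free.filter (fun x => decide (pvIdx saved_order (pvKey x) < n))).Nodup := by
          rw [List.nodup_iff_count_le_one]
          intro a
          by_cases hafm : a ∈ free.filter (fun x => decide (pvIdx saved_order (pvKey x) < n))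
          · obtain ⟨hafree, hdec⟩ := List.mem_filter.mp hafm
            obtain ⟨str, hkey, hsmem⟩ := (pvIdx_lt_iff saved_order (pvKey a)).mp (by simpa using hdec)
            calc List.count a (free.filter (fun x => decide (pvIdx saved_order (pvKey x) < n)))
                ≤ List.count a free := List.Sublist.count_le a List.filter_sublist
              _ ≤ free.countP (fun it => pvKey it == some str) := by
                  rw [List.count]
                  exact List.countP_mono_left (fun x _ hx => by
                    have hxa : x = a := by simpa using hx
                    subst hxa; simp [hkey])
              _ ≤ 1 := huniq str hsmem
          · rw [List.count_eq_zero_of_not_mem hafm]; omega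
        rw [List.perm_ext_iff_of_nodup hnodup_picks hnodup_filter]
        intro a
        rw [mem_picksA, List.mem_filter]
        constructor
        · rintro ⟨k, hk, -, hlka⟩
          refine ⟨hlk_mem k a hlka, ?_⟩
          simp only [decide_eq_true_eq]
          exact (pvIdx_lt_iff saved_order (pvKey a)).mpr ⟨k, hlk_key k a hlka, hk⟩
        · rintro ⟨hafree, hdec⟩
          obtain ⟨str, hkey, hsmem⟩ := (pvIdx_lt_iff saved_order (pvKey a)).mp (by simpa using hdec)
          exact ⟨str, hsmem, by simp [PySem.Set.empty], hlk_of_mem str a hafree hkey hsmem⟩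
      · exact picksA_pairwise lk saved_order hlk_key saved_order (List.prefix_refl _)
    · apply List.filter_congr
      intro it hmem
      show (!PySem.Set.contains (seenA lk saved_order PySem.Set.empty) (pvKey it))
          = decide (pvIdx saved_order (pvKey it) = n)
      by_cases hc : pvIdx saved_order (pvKey it) < n
      · rw [(hseen it hmem).mpr hc]
        symm
        simp only [Bool.not_true, decide_eq_false_iff_not]
        omega
      · have h1 : PySem.Set.contains (seenA lk saved_order PySem.Set.empty) (pvKey it) = false := by
          rw [← Bool.not_eq_true]
          exact fun hcc => hc ((hseen it hmem).mp hcc)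
        rw [h1]
        symm
        simp only [Bool.not_false, decide_eq_true_eq]
        have := pvIdx_le saved_order (pvKey it)
        omega

lemma interleave_len (cf : PySem.Dict (Option String) (List PvItem)) (l : List PvItem) :
    (pvInterleave cf l).length
      = (l.map (fun it => 1 + (PySem.Dict.getD cf (pvItemGet it "key") []).length)).sum := by
  have hgen : ∀ (l acc : List PvItem),
      (l.foldl (fun res it =>
        (PySem.Dict.getD cf (pvItemGet it "key") []).foldl (fun r c => r ++ [c]) (res ++ [it])) acc).length
      = acc.length + (l.map (fun it => 1 + (PySem.Dict.getD cf (pvItemGet it "key") []).length)).sum := by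
    intro l
    induction l with
    | nil => intro acc; simp
    | cons it l ih =>
      intro acc
      rw [List.foldl_cons, PySem.List.foldl_append_singleton, ih]
      simp only [List.map_cons, List.sum_cons, List.length_append, List.length_cons, List.length_nil]
      omega
  rw [pvInterleave, hgen]
  simp

lemma countP_lt_length {α : Type} (l₁ l₂ : List α) (q : α → Bool)
    (h1 : l₁.countP q ≤ 1) (h2 : 2 ≤ l₂.countP q) (hsp : l₁.Subperm l₂) :
    l₁.length < l₂.length := by
  rw [List.length_eq_countP_add_countP q (l := l₁), List.length_eq_countP_add_countP q (l := l₂)]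
  have h3 := hsp.countP_le (fun a => decide ¬(q a = true))
  omega

lemma subperm_map_sum_lt {α : Type} (l₁ l₂ : List α) (w : α → Nat)
    (hw : ∀ x, 1 ≤ w x) (hsp : l₁.Subperm l₂) (hlt : l₁.length < l₂.length) :
    (l₁.map w).sum < (l₂.map w).sum := by
  obtain ⟨l', hp', hs'⟩ := hsp
  obtain ⟨r, hrr⟩ := hs'.exists_perm_append
  have hperm : l₂.Perm (l₁ ++ r) := hrr.trans (hp'.append_right r)
  have hsum : (l₂.map w).sum = (l₁.map w).sum + (r.map w).sum := by
    rw [← List.sum_append, ← List.map_append]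
    exact (hperm.map w).sum_eq
  have hlen2 := hperm.length_eq
  rw [List.length_append] at hlen2
  cases r with
  | nil => rw [hlen2] at hlt; simp at hlt
  | cons x rr =>
    have hwx := hw x
    rw [hsum]
    simp only [List.map_cons, List.sum_cons]
    omega

theorem main_tight (items : List (List (String × Option String))) (saved_order : List String)
    (hd : D_apply_order_py items saved_order) :
    apply_order_py items saved_order ≠ apply_order_py_alt items saved_order := by
  obtain ⟨hsne, k, hk, hcnt⟩ := hd
  have hemp : ¬ saved_order.isEmpty = true := by simpa [List.isEmpty_iff] using hsne
  unfold apply_order_py apply_order_py_alt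
  rw [if_neg hemp, if_neg hemp]
  simp only []
  set free := (pvSeparate items).2 with hfree
  have hcnt' : 2 ≤ free.countP (fun it => pvKey it == some k) := by
    rw [hfree, pvSeparate_snd items]
    simpa [pvKey] using hcnt
  rw [foldlA_eq (free.foldl (fun d it => d.insert (pvItemGet it "key") it) PySem.Dict.empty)
      saved_order [] PySem.Set.empty]
  simp only [List.nil_append]
  set lk : String → Option PvItem := (fun k =>
      PySem.Dict.get? (free.foldl (fun d it => d.insert (pvItemGet it "key") it) PySem.Dict.empty) (some k))
    with hlkdef
  have hlkEq : ∀ k', lk k' = pvLookup free k' := by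
    intro k'
    rw [hlkdef]
    show (free.foldl (fun d it => d.insert (pvKey it) it) PySem.Dict.empty).get? (some k') = _
    rw [get?_keyedFree free (some k')]
    rfl
  have hlk_key : ∀ k' it, lk k' = some it → pvKey it = some k' := by
    intro k' it h
    rw [hlkEq] at h
    have := List.find?_some h
    simpa using this
  have hlk_mem : ∀ k' it, lk k' = some it → it ∈ free := by
    intro k' it h
    rw [hlkEq] at h
    have := List.mem_of_find?_eq_some h
    simpa using this
  have hlk_isSome : ∀ k' it, it ∈ free → pvKey it = some k' → (lk k').isSome = true := by
    intro k' it hmem hkey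
    rw [hlkEq, pvLookup, List.find?_isSome]
    exact ⟨it, by simpa using hmem, by simp [hkey]⟩
  rw [foldl_skip_if (fun it => PySem.Set.contains (seenA lk saved_order PySem.Set.empty) (pvItemGet it "key")) free
      (picksA lk saved_order PySem.Set.empty)]
  intro heq
  have hlen := congrArg List.length heq
  rw [interleave_len, interleave_len] at hlen
  set w : PvItem → Nat := fun it => 1 + (PySem.Dict.getD (pvSeparate items).1 (pvItemGet it "key") []).length
    with hw
  have hB : ((PySem.List.sorted free (fun it =>
      ((PySem.List.enumerate saved_order).foldl
        (fun d ik => if d.contains (some ik.2) then d else d.insert (some ik.2) ik.1)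
        PySem.Dict.empty).getD (pvItemGet it "key") (saved_order.length : Int))).map w).sum
      = (free.map w).sum :=
    ((PySem.List.sorted_perm free _ false).map w).sum_eq
  rw [List.map_append, List.sum_append, hB] at hlen
  have hsplit : ((free.filter (fun it => PySem.Set.contains (seenA lk saved_order PySem.Set.empty) (pvItemGet it "key"))).map w).sum
      + ((free.filter (fun x => !PySem.Set.contains (seenA lk saved_order PySem.Set.empty) (pvItemGet x "key"))).map w).sum
      = (free.map w).sum := by
    rw [← List.sum_append, ← List.map_append]
    exact ((List.filter_append_perm
      (fun it => PySem.Set.contains (seenA lk saved_order PySem.Set.empty) (pvItemGet it "key")) free).map w).sum_eq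
  have hsub : (picksA lk saved_order PySem.Set.empty : List (List (String × Option String)))
      ⊆ free.filter (fun it => PySem.Set.contains (seenA lk saved_order PySem.Set.empty) (pvItemGet it "key")) := by
    intro a ha
    obtain ⟨k', hk', -, hlka⟩ := (mem_picksA lk saved_order PySem.Set.empty a).mp ha
    refine List.mem_filter.mpr ⟨hlk_mem k' a hlka, ?_⟩
    have hkeya : pvKey a = some k' := hlk_key k' a hlka
    have : pvItemGet a "key" = some k' := hkeya
    rw [this, contains_iff_mem, mem_seenA]
    exact Or.inr ⟨k', hk', rfl, by rw [hlka]; rfl⟩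
  have hpw := picksA_pairwise lk saved_order hlk_key saved_order (List.prefix_refl _)
  have hnodup : (picksA lk saved_order PySem.Set.empty).Nodup :=
    hpw.imp (fun {a b} hab habe => by rw [habe] at hab; exact lt_irrefl _ hab)
  have hkeysnodup : ((picksA lk saved_order PySem.Set.empty).map pvKey).Nodup := by
    refine List.Pairwise.map pvKey (fun a b hab => ?_) hpw
    intro habe
    rw [habe] at hab
    exact lt_irrefl _ hab
  have hcount_picks : (picksA lk saved_order PySem.Set.empty).countP (fun it => pvKey it == some k) ≤ 1 := by
    have h1 : (picksA lk saved_order PySem.Set.empty).countP (fun it => pvKey it == some k)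
        = List.count (some k) ((picksA lk saved_order PySem.Set.empty).map pvKey) := by
      rw [List.count, List.countP_map]
      rfl
    rw [h1]
    exact List.nodup_iff_count_le_one.mp hkeysnodup (some k)
  have hcount_filter : 2 ≤ (free.filter (fun it => PySem.Set.contains (seenA lk saved_order PySem.Set.empty) (pvItemGet it "key"))).countP
      (fun it => pvKey it == some k) := by
    rw [List.countP_filter]
    calc 2 ≤ free.countP (fun it => pvKey it == some k) := hcnt'
      _ = free.countP (fun a => (pvKey a == some k)
            && PySem.Set.contains (seenA lk saved_order PySem.Set.empty) (pvItemGet a "key")) := by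
          apply List.countP_congr
          intro x hx
          cases hqx : (pvKey x == some k) with
          | false => simp
          | true =>
            have hkeyx : pvKey x = some k := by simpa using hqx
            have hkeyx' : pvItemGet x "key" = some k := hkeyx
            have hmem : pvItemGet x "key" ∈ seenA lk saved_order ([] : PySem.Set (Option String)) := by
              rw [hkeyx', mem_seenA]
              exact Or.inr ⟨k, hk, rfl, hlk_isSome k x hx hkeyx⟩
            simp [hmem]
  have hsp := hnodup.subperm hsub
  have hlt := countP_lt_length _ _ (fun it => pvKey it == some k) hcount_picks hcount_filter hsp
  have hstrict : ((picksA lk saved_order PySem.Set.empty).map w).sum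
      < ((free.filter (fun it => PySem.Set.contains (seenA lk saved_order PySem.Set.empty) (pvItemGet it "key"))).map w).sum :=
    subperm_map_sum_lt _ _ w (fun x => by simp only [hw]; omega) hsp hlt
  omega

-- ===== VERDICT (by name: the statement is the Claim_ definition above) =====
theorem apply_order_py_spec : Claim_unchanged_apply_order_py := by
  intro items saved_order _ _ hnd
  exact main_equiv items saved_order hnd

theorem apply_order_py_changed : Claim_changed_apply_order_py := by
  unfold Claim_changed_apply_order_py; decide

theorem apply_order_py_tight : Claim_exact_apply_order_py := by
  intro items saved_order _ _ hd
  exact main_tight items saved_order hd
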